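-- pv_equiv track=rewrite | github.com/Owayskhan/AISight1.0 | core/utils/query_distribution.py | calculate_query_distribution
-- ===== SOURCE A (Python) =====
-- from typing import Dict, List
--
-- def calculate_query_distribution(total_queries: int) -> Dict[str, int]:
--     """
--     Calculate how to distribute queries across the 6 intent categories.
--
--     Ensures at least 1 query per category and distributes extras based on business priority:
--     1. Transactional (highest business value - ready to buy)
--     2. Commercial (high business value - researching to buy)
--     3. Consideration (high business value - comparing options)
--     4. Navigational (medium business value - looking for specific sites)
--     5. Awareness (medium business value - discovery phase)
--     6. Informational (lower business value - general information)
--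
--     Args:
--         total_queries: Total number of queries to generate (minimum 6)
--
--     Returns:
--         Dict with query count per intent category
--
--     Examples:
--         k=6:  {"navigational": 1, "informational": 1, "commercial": 1, "transactional": 1, "awareness": 1, "consideration": 1}
--         k=7:  {"navigational": 1, "informational": 1, "commercial": 1, "transactional": 2, "awareness": 1, "consideration": 1}
--         k=12: {"navigational": 2, "informational": 2, "commercial": 2, "transactional": 2, "awareness": 2, "consideration": 2}
--     """
--     if total_queries < 6:
--         raise ValueError("Minimum 6 queries required (one per intent category)")
--
--     # Intent categories in order of business priority
--     categories = ["navigational", "informational", "commercial", "transactional", "awareness", "consideration"]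
--
--     # Start with 1 query per category (minimum requirement)
--     distribution = {category: 1 for category in categories}
--     remaining_queries = total_queries - 6
--
--     # Distribute remaining queries cyclically, prioritizing business value
--     # Priority order: transactional > commercial > consideration > navigational > awareness > informational
--     priority_order = ["transactional", "commercial", "consideration", "navigational", "awareness", "informational"]
--
--     while remaining_queries > 0:
--         for category in priority_order:
--             if remaining_queries > 0:
--                 distribution[category] += 1
--                 remaining_queries -= 1
--             else:
--                 break
--
--     return distribution
-- ===== SOURCE B (Python) =====
-- def calculate_query_distribution(total_queries: int):
--     if total_queries < 6:
--         raise ValueError("Minimum 6 queries required (one per intent category)")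
--     base, rem = divmod(total_queries - 6, 6)
--     priority_rank = {"transactional": 0, "commercial": 1, "consideration": 2,
--                      "navigational": 3, "awareness": 4, "informational": 5}
--     return {c: 1 + base + (1 if priority_rank[c] < rem else 0)
--             for c in ["navigational", "informational", "commercial",
--                       "transactional", "awareness", "consideration"]}
-- ===== Notes on version B (the rewrite author's own statement) =====
-- stated objective: faster
-- what changed: Replaced the O(total_queries) cyclic while-loop handout with a closed-form divmod: each category gets 1 + (total-6)//6 plus 1 if its priority rank is below (total-6)%6.
import Mathlib
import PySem

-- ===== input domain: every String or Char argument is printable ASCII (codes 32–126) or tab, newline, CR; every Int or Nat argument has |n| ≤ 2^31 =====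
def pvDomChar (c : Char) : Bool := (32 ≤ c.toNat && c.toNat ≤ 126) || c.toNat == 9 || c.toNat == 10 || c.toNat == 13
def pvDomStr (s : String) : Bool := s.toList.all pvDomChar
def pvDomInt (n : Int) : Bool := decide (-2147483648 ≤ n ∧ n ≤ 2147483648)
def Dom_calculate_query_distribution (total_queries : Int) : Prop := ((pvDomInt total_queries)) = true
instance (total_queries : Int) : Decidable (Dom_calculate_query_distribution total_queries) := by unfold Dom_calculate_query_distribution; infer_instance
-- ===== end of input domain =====

-- B replaces A's O(total_queries) cyclic handout loop with a closed-form divmod distribution (O(1)); equal on all inputs with total_queries ≥ 6 (A raises ValueError below 6).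


-- ===== PORT A =====
-- inner 'for category in priority_order' pass: state = (distribution, remaining_queries);
-- Python's 'break' only skips iterations whose guard would be false anyway, so the full fold is exact.
def pvStepA (st : PySem.Dict String Int × Int) (cat : String) : PySem.Dict String Int × Int :=
  if st.2 > 0 then (st.1.modify cat 0 (· + 1), st.2 - 1) else st

def pvInnerA (st : PySem.Dict String Int × Int) : PySem.Dict String Int × Int :=
  (["transactional", "commercial", "consideration", "navigational", "awareness", "informational"]).foldl pvStepA st

-- termination measure for the while loop: one inner pass strictly decreases remaining_queries
theorem pvFoldl_stepA_snd_le (l : List String) : ∀ st : PySem.Dict String Int × Int,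
    (l.foldl pvStepA st).2 ≤ st.2 := by
  induction l with
  | nil => intro st; exact le_refl _
  | cons c l ih =>
    intro st
    refine le_trans (ih (pvStepA st c)) ?_
    unfold pvStepA
    split
    · omega
    · exact le_refl _

theorem pvInnerA_snd_lt (d : PySem.Dict String Int) (r : Int) (h : 0 < r) :
    (pvInnerA (d, r)).2.toNat < r.toNat := by
  have h1 : (pvStepA (d, r) "transactional") = (d.modify "transactional" 0 (· + 1), r - 1) := by
    unfold pvStepA
    exact if_pos h
  have h2 := pvFoldl_stepA_snd_le ["commercial", "consideration", "navigational", "awareness", "informational"]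
    (pvStepA (d, r) "transactional")
  rw [h1] at h2
  have h3 : (pvInnerA (d, r)).2 ≤ r - 1 := by
    unfold pvInnerA
    rw [List.foldl_cons, h1]
    exact h2
  omega

-- 'while remaining_queries > 0: …'
def pvLoopA (d : PySem.Dict String Int) (rem : Int) : PySem.Dict String Int :=
  if _h : 0 < rem then
    pvLoopA (pvInnerA (d, rem)).1 (pvInnerA (d, rem)).2
  else d
termination_by rem.toNat
decreasing_by exact pvInnerA_snd_lt d rem _h

-- A raises ValueError for total_queries < 6 (excluded by Pre_); the port returns [] there.
def calculate_query_distribution (total_queries : Int) : List (String × Int) :=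
  if total_queries < 6 then []
  else
    let categories := ["navigational", "informational", "commercial", "transactional", "awareness", "consideration"]
    let distribution := categories.foldl (fun d c => d.insert c (1 : Int)) PySem.Dict.empty
    let remaining_queries := total_queries - 6
    (pvLoopA distribution remaining_queries).items

-- ===== PORT B =====
-- 'priority_rank[c]' never misses a key (every category is in the dict), so getD is exact here.
def calculate_query_distribution_alt (total_queries : Int) : List (String × Int) :=
  if total_queries < 6 then []
  else
    let base := PySem.Int.floordiv (total_queries - 6) 6
    let rem := PySem.Int.mod (total_queries - 6) 6
    let priority_rank : PySem.Dict String Int :=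
      PySem.Dict.ofList [("transactional", 0), ("commercial", 1), ("consideration", 2),
                         ("navigational", 3), ("awareness", 4), ("informational", 5)]
    ((["navigational", "informational", "commercial", "transactional", "awareness", "consideration"]).foldl
      (fun d c => d.insert c (1 + base + (if priority_rank.getD c 0 < rem then (1 : Int) else 0)))
      PySem.Dict.empty).items

-- ===== PRECONDITION & SPEC =====
-- A raises ValueError exactly when total_queries < 6.
def Pre_calculate_query_distribution (total_queries : Int) : Prop := 6 ≤ total_queries
instance (total_queries : Int) : Decidable (Pre_calculate_query_distribution total_queries) := by unfold Pre_calculate_query_distribution; infer_instance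
def pvWitness_calculate_query_distribution : Int := 13

def Spec_calculate_query_distribution (total_queries : Int) (out : List (String × Int)) : Prop := out = calculate_query_distribution_alt total_queries
instance (total_queries : Int) (out : List (String × Int)) : Decidable (Spec_calculate_query_distribution total_queries out) := by unfold Spec_calculate_query_distribution; infer_instance

-- ===== CLAIM (what is proved, stated in full; the proofs are below) =====
def Claim_equal_calculate_query_distribution : Prop := ∀ (total_queries : Int), Dom_calculate_query_distribution total_queries → Pre_calculate_query_distribution total_queries → Spec_calculate_query_distribution total_queries (calculate_query_distribution total_queries)

-- ===== LEMMAS AND PROOFS =====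

-- the loop's dict always has exactly these six keys in this insertion order
def pvD (a b c t w s : Int) : PySem.Dict String Int :=
  ⟨[("navigational", a), ("informational", b), ("commercial", c), ("transactional", t), ("awareness", w), ("consideration", s)]⟩

-- extras a category of priority rank i receives from r leftover queries
def pvEx (i r : Int) : Int := PySem.Int.floordiv r 6 + (if i < PySem.Int.mod r 6 then 1 else 0)

theorem pvStepA_pos (d : PySem.Dict String Int) (x : Int) (cat : String) (h : 0 < x) :
    pvStepA (d, x) cat = (d.modify cat 0 (· + 1), x - 1) := by
  simp [pvStepA, h]

theorem pvInnerA_full (a b c t w s r : Int) (h : 6 ≤ r) :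
    pvInnerA (pvD a b c t w s, r) = (pvD (a+1) (b+1) (c+1) (t+1) (w+1) (s+1), r - 6) := by
  have mt : ∀ a b c t w s : Int, (pvD a b c t w s).modify "transactional" 0 (· + 1) = pvD a b c (t+1) w s := by
    intro a b c t w s
    simp [pvD, PySem.Dict.modify, PySem.Dict.insert, PySem.Dict.getD, PySem.Dict.get?, PySem.Dict.contains]
  have mc : ∀ a b c t w s : Int, (pvD a b c t w s).modify "commercial" 0 (· + 1) = pvD a b (c+1) t w s := by
    intro a b c t w s
    simp [pvD, PySem.Dict.modify, PySem.Dict.insert, PySem.Dict.getD, PySem.Dict.get?, PySem.Dict.contains]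
  have ms : ∀ a b c t w s : Int, (pvD a b c t w s).modify "consideration" 0 (· + 1) = pvD a b c t w (s+1) := by
    intro a b c t w s
    simp [pvD, PySem.Dict.modify, PySem.Dict.insert, PySem.Dict.getD, PySem.Dict.get?, PySem.Dict.contains]
  have mn : ∀ a b c t w s : Int, (pvD a b c t w s).modify "navigational" 0 (· + 1) = pvD (a+1) b c t w s := by
    intro a b c t w s
    simp [pvD, PySem.Dict.modify, PySem.Dict.insert, PySem.Dict.getD, PySem.Dict.get?, PySem.Dict.contains]
  have mw : ∀ a b c t w s : Int, (pvD a b c t w s).modify "awareness" 0 (· + 1) = pvD a b c t (w+1) s := by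
    intro a b c t w s
    simp [pvD, PySem.Dict.modify, PySem.Dict.insert, PySem.Dict.getD, PySem.Dict.get?, PySem.Dict.contains]
  have mb : ∀ a b c t w s : Int, (pvD a b c t w s).modify "informational" 0 (· + 1) = pvD a (b+1) c t w s := by
    intro a b c t w s
    simp [pvD, PySem.Dict.modify, PySem.Dict.insert, PySem.Dict.getD, PySem.Dict.get?, PySem.Dict.contains]
  simp only [pvInnerA, List.foldl]
  rw [pvStepA_pos _ _ _ (by omega : (0:Int) < r), mt,
      pvStepA_pos _ _ _ (by omega : (0:Int) < r - 1), mc,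
      pvStepA_pos _ _ _ (by omega : (0:Int) < r - 1 - 1), ms,
      pvStepA_pos _ _ _ (by omega : (0:Int) < r - 1 - 1 - 1), mn,
      pvStepA_pos _ _ _ (by omega : (0:Int) < r - 1 - 1 - 1 - 1), mw,
      pvStepA_pos _ _ _ (by omega : (0:Int) < r - 1 - 1 - 1 - 1 - 1), mb]
  simp only [Prod.mk.injEq]
  exact ⟨trivial, by omega⟩

theorem pvEx_step (i r : Int) : pvEx i r = 1 + pvEx i (r - 6) := by
  unfold pvEx
  rw [PySem.Int.floordiv_eq_ediv_of_pos (by omega), PySem.Int.floordiv_eq_ediv_of_pos (by omega),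
      PySem.Int.mod_eq_emod_of_pos (by omega), PySem.Int.mod_eq_emod_of_pos (by omega)]
  have h1 : r / 6 = (r - 6) / 6 + 1 := by omega
  have h2 : r % 6 = (r - 6) % 6 := by omega
  rw [h1, h2]; ring

theorem pvLoopA_closed (k : Nat) : ∀ (r : Int), r.toNat ≤ k → 0 ≤ r → ∀ (a b c t w s : Int),
    pvLoopA (pvD a b c t w s) r =
      pvD (a + pvEx 3 r) (b + pvEx 5 r) (c + pvEx 1 r) (t + pvEx 0 r) (w + pvEx 4 r) (s + pvEx 2 r) := by
  induction k with
  | zero =>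
    intro r hk hr a b c t w s
    have hr0 : r = 0 := by omega
    subst hr0
    rw [pvLoopA]
    norm_num [pvEx, pvD, PySem.Int.floordiv, PySem.Int.mod]
  | succ k ih =>
    intro r hk hr a b c t w s
    rw [pvLoopA]
    by_cases hpos : 0 < r
    · rw [dif_pos hpos]
      by_cases h6 : 6 ≤ r
      · rw [pvInnerA_full a b c t w s r h6]
        rw [ih (r - 6) (by omega) (by omega)]
        rw [pvEx_step 3 r, pvEx_step 5 r, pvEx_step 1 r, pvEx_step 0 r,
            pvEx_step 4 r, pvEx_step 2 r]
        simp [pvD]; refine ⟨by ring, by ring, by ring, by ring, by ring, by ring⟩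
      · -- 0 < r < 6: a single partial pass finishes the loop
        interval_cases r <;>
          (rw [show ∀ d r', pvLoopA d r' = if h : 0 < r' then pvLoopA (pvInnerA (d, r')).1 (pvInnerA (d, r')).2 else d
                 from fun d r' => by rw [pvLoopA]]) <;>
          simp [pvInnerA, pvStepA, pvD, pvEx, PySem.Dict.modify, PySem.Dict.insert, PySem.Dict.getD,
                PySem.Dict.get?, PySem.Dict.contains, PySem.Int.floordiv, PySem.Int.mod]
    · rw [dif_neg hpos]
      have hr0 : r = 0 := by omega
      subst hr0
      norm_num [pvEx, pvD, PySem.Int.floordiv, PySem.Int.mod]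

-- ===== VERDICT (by name: the statement is the Claim_ definition above) =====
theorem calculate_query_distribution_spec : Claim_equal_calculate_query_distribution := by
  intro n _ hpre
  unfold Spec_calculate_query_distribution calculate_query_distribution calculate_query_distribution_alt
  have hn : ¬ n < 6 := by exact not_lt.mpr hpre
  rw [if_neg hn, if_neg hn]
  have hinit : (["navigational", "informational", "commercial", "transactional", "awareness", "consideration"]).foldl
      (fun d c => d.insert c (1 : Int)) PySem.Dict.empty = pvD 1 1 1 1 1 1 := by
    simp [pvD, PySem.Dict.empty, PySem.Dict.insert, PySem.Dict.contains]
  simp only [hinit]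
  rw [pvLoopA_closed (n - 6).toNat (n - 6) (le_refl _) (by omega)]
  simp [pvD, pvEx, PySem.Dict.ofList, PySem.Dict.empty, PySem.Dict.insert, PySem.Dict.contains,
        PySem.Dict.get?, PySem.Dict.getD, PySem.Dict.update]
  refine ⟨?_, ?_, ?_, ?_, ?_, ?_⟩ <;> split_ifs <;> ring
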